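-- pv_equiv track=rewrite | github.com/Najia-afk/Aria_moltbot | src/api/sentiment_autoscorer.py | _is_operational_text
-- ===== SOURCE A (Python) =====
-- def _is_operational_text(text: str) -> bool:
--     text_l = text.lower().strip()
--     if not text_l:
--         return False
--     patterns = (
--         "[cron:",
--         "instructions from heartbeat.md",
--         "## your tasks:",
--         "## tool usage:",
--         "return your analysis as structured text",
--         "return your summary as plain text",
--         "delegate to analyst",
--         "run the six_hour_review cron job",
--         "no_reply",
--         "/no_think",
--         "social heartbeat",
--         "church heartbeat",
--         "check moltbook",
--         "respond to mentions",
--         "engage with community",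
--         "you are aria memeothy",
--         "check church of molt status",
--         "submit_prophecy",
--         "do not post more than once",
--     )
--     return any(p in text_l for p in patterns)
-- ===== SOURCE B (Python) =====
-- _PATTERNS = (
--     "[cron:",
--     "instructions from heartbeat.md",
--     "## your tasks:",
--     "## tool usage:",
--     "return your analysis as structured text",
--     "return your summary as plain text",
--     "delegate to analyst",
--     "run the six_hour_review cron job",
--     "no_reply",
--     "/no_think",
--     "social heartbeat",
--     "church heartbeat",
--     "check moltbook",
--     "respond to mentions",
--     "engage with community",
--     "you are aria memeothy",
--     "check church of molt status",
--     "submit_prophecy",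
--     "do not post more than once",
-- )
--
--
-- def _is_operational_text(text: str) -> bool:
--     # Position-major single sweep: walk the text once; at each position ask
--     # whether any marker starts right there.  (Empty text: the loop body never
--     # runs and we return False, matching the empty-string guard.)
--     t = text.lower().strip()
--     for i in range(len(t)):
--         for p in _PATTERNS:
--             if t.startswith(p, i):
--                 return True
--     return False
-- ===== Notes on version B (the rewrite author's own statement) =====
-- stated objective: alternative
-- what changed: Replaces A's pattern-major scan (a separate substring search `p in text_l` per pattern) by a single position-major sweep over the normalized text that at each index checks whether any marker starts there via startswith, with no separate empty-string guard.
import Mathlib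
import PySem

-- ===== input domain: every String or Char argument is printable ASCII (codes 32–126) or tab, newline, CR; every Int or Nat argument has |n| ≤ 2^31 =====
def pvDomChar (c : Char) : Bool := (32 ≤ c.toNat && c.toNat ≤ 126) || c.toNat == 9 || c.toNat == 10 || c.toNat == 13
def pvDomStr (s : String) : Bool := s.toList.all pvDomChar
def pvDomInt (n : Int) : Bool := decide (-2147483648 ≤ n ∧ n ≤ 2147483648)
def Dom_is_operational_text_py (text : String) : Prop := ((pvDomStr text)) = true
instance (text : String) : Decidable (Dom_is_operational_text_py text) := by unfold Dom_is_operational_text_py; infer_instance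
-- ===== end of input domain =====

-- B replaces A's pattern-major scan (one `p in text` search per pattern) by a single
-- position-major sweep over the normalized text checking startswith at each index
-- (alternative decomposition; same asymptotic cost).


-- the marker patterns (shared literal data of both programs)
def pvPatterns : List String :=
  [ "[cron:",
    "instructions from heartbeat.md",
    "## your tasks:",
    "## tool usage:",
    "return your analysis as structured text",
    "return your summary as plain text",
    "delegate to analyst",
    "run the six_hour_review cron job",
    "no_reply",
    "/no_think",
    "social heartbeat",
    "church heartbeat",
    "check moltbook",
    "respond to mentions",
    "engage with community",
    "you are aria memeothy",
    "check church of molt status",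
    "submit_prophecy",
    "do not post more than once" ]

-- ===== PORT A =====
-- literal transliteration of A: normalize, empty guard, then `any(p in text_l for p in patterns)`
def is_operational_text_py (text : String) : Bool :=
  let text_l := PySem.Str.strip (PySem.Str.lower text)
  if PySem.Str.len text_l == 0 then false
  else pvPatterns.any (fun p => PySem.Str.isIn p text_l)

-- ===== PORT B =====
-- B's sweep: `for i in range(len(t)): for p in _PATTERNS: if t.startswith(p, i): return True`
-- ported on the character list: recurse over the suffixes of t, at each one check
-- whether any pattern is a prefix (t.startswith(p, i) = startswith of the i-th suffix).
def pvSweep (pats : List (List Char)) : List Char → Bool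
  | [] => false
  | c :: rest =>
    pats.any (fun p => PySem.Chars.startswith (c :: rest) p) || pvSweep pats rest

def is_operational_text_py_alt (text : String) : Bool :=
  pvSweep (pvPatterns.map String.toList)
    (PySem.Chars.strip (PySem.Chars.lower text.toList))

-- ===== PRECONDITION & SPEC =====
def Spec_is_operational_text_py (text : String) (out : Bool) : Prop := out = is_operational_text_py_alt text
instance (text : String) (out : Bool) : Decidable (Spec_is_operational_text_py text out) := by unfold Spec_is_operational_text_py; infer_instance

-- ===== CLAIM (what is proved, stated in full; the proofs are below) =====
def Claim_equal_is_operational_text_py : Prop := ∀ (text : String), Dom_is_operational_text_py text → Spec_is_operational_text_py text (is_operational_text_py text)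

-- ===== LEMMAS AND PROOFS =====

-- the sweep finds exactly the patterns that occur as an infix, provided all patterns are nonempty
theorem pvSweep_eq_any_isIn (pats : List (List Char)) (hne : ∀ p ∈ pats, p ≠ [])
    (l : List Char) :
    pvSweep pats l = pats.any (fun p => PySem.Chars.isIn p l) := by
  induction l with
  | nil =>
    simp only [pvSweep]
    symm
    simp only [List.any_eq_false]
    intro p hp h
    exact hne p hp (List.eq_nil_of_infix_nil ((PySem.Chars.isIn_iff_infix _ _).mp h))
  | cons c rest ih =>
    simp only [pvSweep, ih]
    apply Bool.eq_iff_iff.mpr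
    simp only [Bool.or_eq_true, List.any_eq_true]
    constructor
    · rintro (⟨p, hp, hsw⟩ | ⟨p, hp, hin⟩)
      · exact ⟨p, hp, (PySem.Chars.isIn_iff_infix _ _).mpr ((PySem.Chars.startswith_iff _ _).mp hsw).isInfix⟩
      · exact ⟨p, hp, (PySem.Chars.isIn_iff_infix _ _).mpr
          (((PySem.Chars.isIn_iff_infix _ _).mp hin).trans (List.suffix_cons c rest).isInfix)⟩
    · rintro ⟨p, hp, hin⟩
      rcases List.infix_cons_iff.mp ((PySem.Chars.isIn_iff_infix _ _).mp hin) with hpre | hinf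
      · exact Or.inl ⟨p, hp, (PySem.Chars.startswith_iff _ _).mpr hpre⟩
      · exact Or.inr ⟨p, hp, (PySem.Chars.isIn_iff_infix _ _).mpr hinf⟩

theorem pvPatterns_ne_nil : ∀ p ∈ pvPatterns.map String.toList, p ≠ [] := by decide

-- ===== VERDICT (by name: the statement is the Claim_ definition above) =====
theorem is_operational_text_py_spec : Claim_equal_is_operational_text_py := by
  intro text _
  unfold Spec_is_operational_text_py is_operational_text_py is_operational_text_py_alt
  rw [pvSweep_eq_any_isIn _ pvPatterns_ne_nil]
  cases h : PySem.Chars.strip (PySem.Chars.lower text.toList) with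
  | nil =>
    simp [PySem.Str.len, PySem.Str.strip, PySem.Str.lower, h, List.any_map,
      Function.comp_def]
    decide
  | cons c rest =>
    simp [PySem.Str.len, PySem.Str.strip, PySem.Str.lower, h, List.any_map,
      Function.comp_def]
    intro p _ _
    omega
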